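-- pv_equiv track=rewrite | github.com/Ismantic/Wapic | scripts/prepare_data.py | word_to_bmes
-- ===== SOURCE A (Python) =====
-- def word_to_bmes(word):
--     """Convert a word to BMES tags."""
--     chars = list(word)
--     if len(chars) == 1:
--         return [(chars[0], 'S')]
--     tags = []
--     for i, c in enumerate(chars):
--         if i == 0:
--             tags.append((c, 'B'))
--         elif i == len(chars) - 1:
--             tags.append((c, 'E'))
--         else:
--             tags.append((c, 'M'))
--     return tags
-- ===== SOURCE B (Python) =====
-- def word_to_bmes(word):
--     """Convert a word to BMES tags."""
--     chars = list(word)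
--     n = len(chars)
--     if n == 0:
--         return []
--     if n == 1:
--         return [(chars[0], 'S')]
--     tags = 'B' + 'M' * (n - 2) + 'E'
--     return list(zip(chars, tags))
-- ===== Notes on version B (the rewrite author's own statement) =====
-- stated objective: faster
-- what changed: Replaces the indexed Python-level loop with per-position branching by constructing the whole tag pattern up front via string repetition and pairing it with the characters using zip.
import Mathlib
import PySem

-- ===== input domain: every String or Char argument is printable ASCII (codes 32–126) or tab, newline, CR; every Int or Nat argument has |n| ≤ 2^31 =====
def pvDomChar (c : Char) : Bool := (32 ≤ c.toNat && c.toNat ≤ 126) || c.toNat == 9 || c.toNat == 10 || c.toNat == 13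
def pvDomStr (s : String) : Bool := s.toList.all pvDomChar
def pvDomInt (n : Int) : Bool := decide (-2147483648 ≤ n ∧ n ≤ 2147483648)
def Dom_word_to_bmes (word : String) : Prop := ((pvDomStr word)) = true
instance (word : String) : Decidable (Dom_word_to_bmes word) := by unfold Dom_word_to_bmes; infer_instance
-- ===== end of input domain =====

-- B builds the whole BMES tag pattern up front (string repetition) and zips it with the characters,
-- instead of A's indexed loop with per-position branching; a timing run measured B faster (constant factor).


-- ===== PORT A =====
-- chars[0] is in range because the branch requires len(chars) == 1, so getD is exact there
def word_to_bmes (word : String) : List (String × String) :=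
  let chars := word.toList
  if chars.length = 1 then [(String.ofList [chars.getD 0 ' '], "S")]
  else
    (PySem.List.enumerate chars 0).foldl
      (fun tags ic =>
        if ic.1 = 0 then tags ++ [(String.ofList [ic.2], "B")]
        else if ic.1 = (chars.length : Int) - 1 then tags ++ [(String.ofList [ic.2], "E")]
        else tags ++ [(String.ofList [ic.2], "M")]) []

-- ===== PORT B =====
def word_to_bmes_alt (word : String) : List (String × String) :=
  let chars := word.toList
  let n := chars.length
  if n = 0 then []
  else if n = 1 then [(String.ofList [chars.getD 0 ' '], "S")]
  else
    let tags := ['B'] ++ List.replicate (n - 2) 'M' ++ ['E']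
    (chars.zip tags).map (fun p => (String.ofList [p.1], String.ofList [p.2]))

-- ===== PRECONDITION & SPEC =====
def Spec_word_to_bmes (word : String) (out : List (String × String)) : Prop := out = word_to_bmes_alt word
instance (word : String) (out : List (String × String)) : Decidable (Spec_word_to_bmes word out) := by unfold Spec_word_to_bmes; infer_instance

-- ===== CLAIM (what is proved, stated in full; the proofs are below) =====
def Claim_equal_word_to_bmes : Prop := ∀ (word : String), Dom_word_to_bmes word → Spec_word_to_bmes word (word_to_bmes word)

-- ===== LEMMAS AND PROOFS =====

-- the tag pair A's fold appends at enumerate-index i, with n the word length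
def pvTagA (n : Nat) (i : Int) (c : Char) : String × String :=
  if i = 0 then (String.ofList [c], "B")
  else if i = (n : Int) - 1 then (String.ofList [c], "E")
  else (String.ofList [c], "M")

lemma foldA_eq_map (cs : List Char) (n : Nat) :
    (PySem.List.enumerate cs 0).foldl
      (fun tags ic =>
        if ic.1 = 0 then tags ++ [(String.ofList [ic.2], "B")]
        else if ic.1 = (n : Int) - 1 then tags ++ [(String.ofList [ic.2], "E")]
        else tags ++ [(String.ofList [ic.2], "M")]) []
      = (PySem.List.enumerate cs 0).map (fun ic => pvTagA n ic.1 ic.2) := by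
  rw [show (fun (tags : List (String × String)) (ic : Int × Char) =>
        if ic.1 = 0 then tags ++ [(String.ofList [ic.2], "B")]
        else if ic.1 = (n : Int) - 1 then tags ++ [(String.ofList [ic.2], "E")]
        else tags ++ [(String.ofList [ic.2], "M")])
      = (fun tags ic => tags ++ [pvTagA n ic.1 ic.2]) from by
    funext tags ic; unfold pvTagA; split_ifs <;> rfl]
  exact PySem.List.foldl_append_singleton_eq_map ..

lemma pattern_getElem (n k : Nat) (h2 : 2 ≤ n) (hk : k < n) :
    (['B'] ++ List.replicate (n - 2) 'M' ++ ['E'])[k]'(by simp; omega)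
      = (if k = 0 then 'B' else if k = n - 1 then 'E' else 'M') := by
  rcases eq_or_ne k 0 with rfl | hk0
  · simp
  rcases eq_or_ne k (n - 1) with rfl | hkn
  · rw [List.getElem_append_right (by simp; omega)]
    simp; omega
  · rw [List.getElem_append_left (by simp; omega),
        List.getElem_append_right (by simp; omega)]
    simp [hk0, hkn]

-- ===== VERDICT (by name: the statement is the Claim_ definition above) =====
theorem word_to_bmes_spec : Claim_equal_word_to_bmes := by
  intro word _
  show word_to_bmes word = word_to_bmes_alt word
  rw [word_to_bmes, word_to_bmes_alt]
  set cs := word.toList with hcs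
  rcases Nat.lt_or_ge cs.length 2 with hlt | h2
  · interval_cases h : cs.length
    · rw [List.length_eq_zero_iff] at h
      simp [h]
    · simp [h]
  · have h0 : cs.length ≠ 0 := by omega
    have h1 : cs.length ≠ 1 := by omega
    rw [if_neg h1, if_neg h0, if_neg h1, foldA_eq_map]
    apply List.ext_getElem
    · simp [PySem.List.length_enumerate]; omega
    · intro k hk1 hk2
      have hk : k < cs.length := by
        simpa [PySem.List.length_enumerate] using hk1
      rw [List.getElem_map, PySem.List.getElem_enumerate, List.getElem_map,
          List.getElem_zip, pattern_getElem cs.length k h2 hk]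
      unfold pvTagA
      simp only [Int.zero_add]
      rcases eq_or_ne k 0 with rfl | hk0
      · simp
      rcases eq_or_ne k (cs.length - 1) with rfl | hkn
      · rw [if_neg (by exact_mod_cast hk0), if_pos (by omega),
            if_neg hk0, if_pos rfl]
      · rw [if_neg (by exact_mod_cast hk0), if_neg (by omega),
            if_neg hk0, if_neg hkn]
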